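-- pv_equiv track=rewrite | github.com/E-W-Jones/AoC2023 | Day 14/day14.py | unhash
-- ===== SOURCE A (Python) =====
-- def unhash(hash, grid):
--     for i, row in enumerate(grid):
--         for j, char in enumerate(row):
--             if char == '#':
--                 pass
--             elif (i, j) in hash:
--                 grid[i][j] = 'O'
--             else:
--                 grid[i][j] = '.'
--     return grid
-- ===== SOURCE B (Python) =====
-- def unhash(hash, grid):
--     # Phase 1: blank every non-'#' cell.
--     for row in grid:
--         for j, char in enumerate(row):
--             if char != '#':
--                 row[j] = '.'
--     # Phase 2: drop an 'O' at each hashed coordinate that names a non-'#' cell.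
--     for i, j in hash:
--         if 0 <= i < len(grid) and 0 <= j < len(grid[i]) and grid[i][j] != '#':
--             grid[i][j] = 'O'
--     return grid
-- ===== Notes on version B (the rewrite author's own statement) =====
-- stated objective: alternative
-- what changed: Instead of testing every grid cell for membership in hash, B first blanks all non-'#' cells in one pass and then iterates over the hash coordinates directly, placing 'O's with an in-bounds/non-'#' guard.
import Mathlib
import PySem

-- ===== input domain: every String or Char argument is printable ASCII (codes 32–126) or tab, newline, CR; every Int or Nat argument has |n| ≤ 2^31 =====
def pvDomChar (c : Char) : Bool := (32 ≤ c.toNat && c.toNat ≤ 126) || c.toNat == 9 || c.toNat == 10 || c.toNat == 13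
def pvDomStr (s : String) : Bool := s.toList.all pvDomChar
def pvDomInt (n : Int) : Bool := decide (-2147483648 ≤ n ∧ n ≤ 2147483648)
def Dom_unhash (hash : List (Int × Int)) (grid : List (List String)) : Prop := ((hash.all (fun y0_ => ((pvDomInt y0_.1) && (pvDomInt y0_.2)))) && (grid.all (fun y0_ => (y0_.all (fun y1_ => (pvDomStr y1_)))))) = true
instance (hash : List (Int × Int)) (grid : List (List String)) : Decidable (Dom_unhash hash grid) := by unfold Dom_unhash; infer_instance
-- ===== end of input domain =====

-- B blanks all non-'#' cells in one pass and then writes 'O' only at the hashed coordinates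
-- (guarded in-bounds / non-'#'), instead of testing every cell for membership in hash.
-- Both programs mutate `grid` in place in Python; the equivalence proved here is about the return value.

-- ===== PORT A =====
def unhash (hash : List (Int × Int)) (grid : List (List String)) : List (List String) :=
  (PySem.List.enumerate grid).map (fun ir =>
    (PySem.List.enumerate ir.2).map (fun jc =>
      if jc.2 = "#" then jc.2
      else if (ir.1, jc.1) ∈ hash then "O" else "."))

-- ===== PORT B =====
-- one guarded placement of an 'O' at coordinate p (phase 2 loop body of Source B)
def pvPlace (g : List (List String)) (p : Int × Int) : List (List String) :=
  if 0 ≤ p.1 ∧ p.1 < (g.length : Int) ∧ 0 ≤ p.2 ∧ p.2 < ((g.getD p.1.toNat []).length : Int)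
      ∧ (g.getD p.1.toNat []).getD p.2.toNat "" ≠ "#" then
    g.set p.1.toNat ((g.getD p.1.toNat []).set p.2.toNat "O")
  else g

def unhash_alt (hash : List (Int × Int)) (grid : List (List String)) : List (List String) :=
  hash.foldl pvPlace (grid.map (fun row => row.map (fun c => if c ≠ "#" then "." else c)))

-- ===== PRECONDITION & SPEC =====
def Spec_unhash (hash : List (Int × Int)) (grid : List (List String)) (out : List (List String)) : Prop := out = unhash_alt hash grid
instance (hash : List (Int × Int)) (grid : List (List String)) (out : List (List String)) : Decidable (Spec_unhash hash grid out) := by unfold Spec_unhash; infer_instance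

-- ===== CLAIM (what is proved, stated in full; the proofs are below) =====
def Claim_equal_unhash : Prop := ∀ (hash : List (Int × Int)) (grid : List (List String)), Dom_unhash hash grid → Spec_unhash hash grid (unhash hash grid)

-- ===== LEMMAS AND PROOFS =====

-- the (i,j) cell of a nested list, with defaults (only used at in-range indices)
def pvCell (g : List (List String)) (i j : Nat) : String := (g.getD i []).getD j ""

theorem getD_set_rowlen (g : List (List String)) (n i : Nat) (r : List String)
    (hr : r.length = (g.getD n []).length) :
    ((g.set n r).getD i []).length = (g.getD i []).length := by
  simp only [List.getD, List.getElem?_set]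
  split_ifs with h1 h2
  · subst h1; simpa using hr
  · subst h1; rw [List.getElem?_eq_none (by omega)]
  · rfl

theorem pvPlace_length (g : List (List String)) (p : Int × Int) :
    (pvPlace g p).length = g.length := by
  unfold pvPlace; split <;> simp

theorem pvPlace_rowlen (g : List (List String)) (p : Int × Int) (i : Nat) :
    ((pvPlace g p).getD i []).length = (g.getD i []).length := by
  unfold pvPlace; split
  · exact getD_set_rowlen _ _ _ _ (by simp)
  · rfl

theorem pvCell_set (g : List (List String)) (n : Nat) (r : List String) (i j : Nat) :
    pvCell (g.set n r) i j = if n = i ∧ n < g.length then r.getD j "" else pvCell g i j := by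
  unfold pvCell
  by_cases h2 : n < g.length
  · by_cases h1 : n = i
    · subst h1; simp [List.getD, h2]
    · simp [List.getD, h1, h2]
  · rw [List.set_eq_of_length_le (by omega), if_neg (by tauto)]

theorem getD_set_same (r : List String) (m j : Nat) (x d : String) (hm : m = j)
    (hj : j < r.length) : (r.set m x).getD j d = x := by
  subst hm; simp [List.getD, hj]

theorem getD_set_other (r : List String) (m j : Nat) (x d : String) (hm : m ≠ j) :
    (r.set m x).getD j d = r.getD j d := by
  simp [List.getD, hm]

theorem pvCell_place (g : List (List String)) (p : Int × Int) (i j : Nat)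
    (hi : i < g.length) (hj : j < (g.getD i []).length) :
    pvCell (pvPlace g p) i j =
      if p = ((i : Int), (j : Int)) ∧ pvCell g i j ≠ "#" then "O" else pvCell g i j := by
  unfold pvPlace
  split
  · rename_i h
    obtain ⟨h1, h2, h3, h4, h5⟩ := h
    rw [pvCell_set]
    by_cases hia : p.1.toNat = i
    · by_cases hjb : p.2.toNat = j
      · have hp : p = ((i : Int), (j : Int)) := by
          obtain ⟨a, b⟩ := p; simp_all; omega
        rw [if_pos ⟨hia, by omega⟩]
        rw [getD_set_same _ _ _ _ _ (by omega) (by rw [hia]; omega)]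
        have hcell : pvCell g i j ≠ "#" := by
          unfold pvCell; rw [← hia, ← hjb]; exact h5
        rw [if_pos ⟨hp, hcell⟩]
      · have hp : p ≠ ((i : Int), (j : Int)) := by
          obtain ⟨a, b⟩ := p; simp_all; intro _; omega
        rw [if_pos ⟨hia, by omega⟩, if_neg (by simp [hp])]
        rw [← hia]
        exact getD_set_other _ _ _ _ _ (by omega)
    · have hp : p ≠ ((i : Int), (j : Int)) := by
        obtain ⟨a, b⟩ := p; simp_all; intro h; omega
      rw [if_neg (by simp [hia]), if_neg (by simp [hp])]
  · rename_i h
    rw [if_neg]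
    rintro ⟨hp, hcell⟩
    subst hp
    apply h
    refine ⟨by omega, by simpa using hi, by omega, ?_, ?_⟩
    · simpa using hj
    · simpa [pvCell] using hcell

theorem pvFold_cell (ps : List (Int × Int)) (g : List (List String)) (i j : Nat)
    (hi : i < g.length) (hj : j < (g.getD i []).length) :
    pvCell (ps.foldl pvPlace g) i j =
      if ((i : Int), (j : Int)) ∈ ps ∧ pvCell g i j ≠ "#" then "O" else pvCell g i j := by
  have hO : ("O" : String) ≠ "#" := by decide
  induction ps generalizing g with
  | nil => simp
  | cons p ps ih =>
    rw [List.foldl_cons]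
    have hi' : i < (pvPlace g p).length := by rw [pvPlace_length]; exact hi
    have hj' : j < ((pvPlace g p).getD i []).length := by rw [pvPlace_rowlen]; exact hj
    rw [ih _ hi' hj', pvCell_place g p i j hi hj]
    by_cases hsh : pvCell g i j = "#"
    · simp [hsh]
    · by_cases hp : p = ((i : Int), (j : Int))
      · simp [hp, hsh, hO]
      · simp [hp, hsh, Ne.symm hp]

theorem pvFold_length (ps : List (Int × Int)) (g : List (List String)) :
    (ps.foldl pvPlace g).length = g.length := by
  induction ps generalizing g with
  | nil => rfl
  | cons p ps ih => rw [List.foldl_cons, ih, pvPlace_length]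

theorem pvFold_rowlen (ps : List (Int × Int)) (g : List (List String)) (i : Nat) :
    ((ps.foldl pvPlace g).getD i []).length = (g.getD i []).length := by
  induction ps generalizing g with
  | nil => rfl
  | cons p ps ih => rw [List.foldl_cons, ih, pvPlace_rowlen]

-- ===== VERDICT (by name: the statement is the Claim_ definition above) =====
theorem unhash_spec : Claim_equal_unhash := by
  intro hash grid _
  unfold Spec_unhash unhash unhash_alt
  set blanked := grid.map (fun row => row.map (fun c => if c ≠ "#" then "." else c)) with hbl
  have hblen : blanked.length = grid.length := by simp [hbl]
  have hbrow : ∀ i : Nat, i < grid.length →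
      blanked.getD i [] = (grid.getD i []).map (fun c => if c ≠ "#" then "." else c) := by
    intro i hilt
    simp [hbl, List.getD, List.getElem?_map, List.getElem?_eq_getElem hilt]
  have hdot : ("." : String) ≠ "#" := by decide
  apply List.ext_getElem
  · simp [pvFold_length, hblen, PySem.List.length_enumerate]
  · intro i h1 h2
    have hilt : i < grid.length := by
      simpa [PySem.List.length_enumerate] using h1
    have hrow' : blanked.getD i [] = grid[i].map (fun c => if c ≠ "#" then "." else c) := by
      rw [hbrow i hilt, List.getD_eq_getElem _ _ hilt]
    apply List.ext_getElem
    · simp only [List.getElem_map, PySem.List.getElem_enumerate, List.length_map,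
        PySem.List.length_enumerate]
      rw [← List.getD_eq_getElem (List.foldl pvPlace blanked hash) ([] : List String) h2,
        pvFold_rowlen, hrow']
      simp
    · intro j hj1 hj2
      have hjg : j < grid[i].length := by
        simpa [PySem.List.getElem_enumerate, PySem.List.length_enumerate] using hj1
      have hjb : j < (blanked.getD i []).length := by rw [hrow']; simpa using hjg
      have hB : pvCell (List.foldl pvPlace blanked hash) i j =
          (List.foldl pvPlace blanked hash)[i][j] := by
        unfold pvCell
        rw [List.getD_eq_getElem _ _ h2, List.getD_eq_getElem]
      have hbcell : pvCell blanked i j = if grid[i][j] ≠ "#" then "." else grid[i][j] := by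
        unfold pvCell
        rw [hrow', List.getD_eq_getElem _ _ (by simpa using hjg), List.getElem_map]
      simp only [List.getElem_map, PySem.List.getElem_enumerate]
      rw [← hB, pvFold_cell hash blanked i j (by omega) hjb, hbcell]
      simp only [zero_add]
      by_cases hsh : grid[i][j] = "#"
      · simp [hsh]
      · by_cases hm : (((i : Int), (j : Int))) ∈ hash
        · simp [hsh, hm, hdot]
        · simp [hsh, hm, hdot]
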